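-- pv_equiv track=rewrite | github.com/rachellea/sarle-labeler | src/term_search.py | label_for_keyterm_and_sentence
-- ===== SOURCE A (Python) =====
-- def label_for_keyterm_and_sentence(keyterm, sentence, termdict):
--     """Return label = 1 if <keyterm> in <sentence> else return label = 0"""
--     sentence = ' ' + sentence + ' '
--     label = 0
--     for any_term in termdict[keyterm]['Any']:
--         if any_term in sentence:
--             label = 1
--     if label == 0: #if label is still 0 check for secondary equivalent terms
--         if 'Term1' in termdict[keyterm].keys():
--             for term1 in termdict[keyterm]['Term1']:
--                 for term2 in termdict[keyterm]['Term2']: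
--                     if (term1 in sentence) and (term2 in sentence):
--                         label = 1
--                         break
--     #Dealing with 'Exclude'
--     if 'Exclude' in termdict[keyterm].keys():
--         for banned_term in termdict[keyterm]['Exclude']:
--             if banned_term in sentence:
--                 label = 0 #cannot write return 0 because that means the function doesn't return any value
--     return label
-- ===== SOURCE B (Python) =====
-- def label_for_keyterm_and_sentence(keyterm, sentence, termdict):
--     """Return label = 1 if <keyterm> in <sentence> else return label = 0"""
--     entry = termdict[keyterm]
--     padded = ' ' + sentence + ' '
--     if any(t in padded for t in entry['Any']):
--         label = 1
--     elif 'Term1' in entry and entry['Term1']: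
--         label = int(any(t in padded for t in entry['Term1'])
--                     and any(t in padded for t in entry['Term2']))
--     else:
--         label = 0
--     if any(t in padded for t in entry.get('Exclude', [])):
--         label = 0
--     return label
-- ===== Notes on version B (the rewrite author's own statement) =====
-- stated objective: simpler
-- what changed: The nested Term1-by-Term2 double loop with break is replaced by two independent any() membership scans combined with 'and', and the three label-mutating for-loops become a single if/elif expression plus one any() over entry.get('Exclude', []).
import Mathlib
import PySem

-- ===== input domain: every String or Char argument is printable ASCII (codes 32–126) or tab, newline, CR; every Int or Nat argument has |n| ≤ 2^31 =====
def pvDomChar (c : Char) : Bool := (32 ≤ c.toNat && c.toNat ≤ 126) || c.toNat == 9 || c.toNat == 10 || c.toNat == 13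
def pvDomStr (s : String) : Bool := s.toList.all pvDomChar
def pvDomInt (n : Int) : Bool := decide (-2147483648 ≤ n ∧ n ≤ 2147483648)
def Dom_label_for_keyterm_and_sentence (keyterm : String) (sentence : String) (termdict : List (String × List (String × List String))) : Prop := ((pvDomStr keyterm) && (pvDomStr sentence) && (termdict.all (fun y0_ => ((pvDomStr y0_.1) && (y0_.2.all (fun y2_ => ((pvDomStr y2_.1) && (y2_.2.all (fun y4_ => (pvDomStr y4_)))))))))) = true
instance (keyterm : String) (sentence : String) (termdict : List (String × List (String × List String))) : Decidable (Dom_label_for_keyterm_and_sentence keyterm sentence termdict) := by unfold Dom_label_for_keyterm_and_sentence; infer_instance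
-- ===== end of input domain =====

-- B replaces A's nested Term1×Term2 double loop and label-mutating for-loops by independent
-- any() membership scans combined with boolean logic (simpler; same asymptotic cost not claimed faster).


-- ===== PORT A =====
-- inner 'for term2 in termdict[keyterm]['Term2']: … break' loop of A
def pvInnerA (cs : List Char) (t1 : String) (term2s : List String) (label : Int) : Int :=
  match term2s with
  | [] => label
  | t2 :: rest =>
    if PySem.Chars.isIn t1.toList cs && PySem.Chars.isIn t2.toList cs then 1
    else pvInnerA cs t1 rest label

def label_for_keyterm_and_sentence (keyterm : String) (sentence : String) (termdict : List (String × List (String × List String))) : Int :=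
  let cs : List Char := ' ' :: sentence.toList ++ [' ']   -- sentence = ' ' + sentence + ' '
  match (PySem.Dict.mk termdict).get? keyterm with
  | none => 0   -- Python: KeyError (excluded by Pre_)
  | some entry =>
    let e := PySem.Dict.mk entry
    match e.get? "Any" with
    | none => 0   -- Python: KeyError (excluded by Pre_)
    | some anyl =>
      let label : Int := anyl.foldl (fun lab t => if PySem.Chars.isIn t.toList cs then 1 else lab) 0
      let label : Int :=
        if label = 0 then
          match e.get? "Term1" with
          | none => label
          | some l1 =>
            l1.foldl (fun lab t1 =>
              match e.get? "Term2" with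
              | none => lab   -- Python: KeyError inside the loop (excluded by Pre_)
              | some l2 => pvInnerA cs t1 l2 lab) label
        else label
      match e.get? "Exclude" with
      | none => label
      | some lex => lex.foldl (fun lab t => if PySem.Chars.isIn t.toList cs then 0 else lab) label

-- ===== PORT B =====
def label_for_keyterm_and_sentence_alt (keyterm : String) (sentence : String) (termdict : List (String × List (String × List String))) : Int :=
  let cs : List Char := ' ' :: sentence.toList ++ [' ']   -- padded = ' ' + sentence + ' '
  match (PySem.Dict.mk termdict).get? keyterm with
  | none => 0   -- Python: KeyError (excluded by Pre_)
  | some entry =>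
    let e := PySem.Dict.mk entry
    match e.get? "Any" with
    | none => 0   -- Python: KeyError (excluded by Pre_)
    | some anyl =>
      let label : Int :=
        if anyl.any (fun t => PySem.Chars.isIn t.toList cs) then 1
        else
          match e.get? "Term1" with   -- 'Term1' in entry and entry['Term1']
          | some l1 =>
            if !l1.isEmpty then
              if l1.any (fun t => PySem.Chars.isIn t.toList cs) then
                -- short-circuiting 'and': entry['Term2'] only touched when some Term1 term matched
                match e.get? "Term2" with
                | none => 0   -- Python: KeyError (excluded by Pre_)
                | some l2 => if l2.any (fun t => PySem.Chars.isIn t.toList cs) then 1 else 0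
              else 0
            else 0
          | none => 0
      if (e.getD "Exclude" []).any (fun t => PySem.Chars.isIn t.toList cs) then 0 else label

-- ===== PRECONDITION & SPEC =====
-- Pre_ holds exactly where the Python A returns: keyterm and 'Any' keys exist, and the KeyError('Term2')
-- path (no 'Any' match, nonempty 'Term1' list, no 'Term2' key) is not taken. Nothing A returns on is excluded.
def pvPreB (keyterm : String) (sentence : String) (termdict : List (String × List (String × List String))) : Bool :=
  let cs : List Char := ' ' :: sentence.toList ++ [' ']
  match (PySem.Dict.mk termdict).get? keyterm with
  | none => false
  | some entry =>
    let e := PySem.Dict.mk entry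
    match e.get? "Any" with
    | none => false
    | some anyl =>
      anyl.any (fun t => PySem.Chars.isIn t.toList cs)
        || (e.getD "Term1" []).isEmpty || (e.get? "Term2").isSome

def Pre_label_for_keyterm_and_sentence (keyterm : String) (sentence : String) (termdict : List (String × List (String × List String))) : Prop :=
  pvPreB keyterm sentence termdict = true
instance (keyterm : String) (sentence : String) (termdict : List (String × List (String × List String))) : Decidable (Pre_label_for_keyterm_and_sentence keyterm sentence termdict) := by unfold Pre_label_for_keyterm_and_sentence; infer_instance

def pvWitness_label_for_keyterm_and_sentence : String × String × (List (String × List (String × List String))) :=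
  ("k", "big cat", [("k", [("Any", ["cat"]), ("Exclude", ["dog"])])])

def Spec_label_for_keyterm_and_sentence (keyterm : String) (sentence : String) (termdict : List (String × List (String × List String))) (out : Int) : Prop := out = label_for_keyterm_and_sentence_alt keyterm sentence termdict
instance (keyterm : String) (sentence : String) (termdict : List (String × List (String × List String))) (out : Int) : Decidable (Spec_label_for_keyterm_and_sentence keyterm sentence termdict out) := by unfold Spec_label_for_keyterm_and_sentence; infer_instance

-- ===== CLAIM (what is proved, stated in full; the proofs are below) =====
def Claim_equal_label_for_keyterm_and_sentence : Prop := ∀ (keyterm : String) (sentence : String) (termdict : List (String × List (String × List String))), Dom_label_for_keyterm_and_sentence keyterm sentence termdict → Pre_label_for_keyterm_and_sentence keyterm sentence termdict → Spec_label_for_keyterm_and_sentence keyterm sentence termdict (label_for_keyterm_and_sentence keyterm sentence termdict)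

-- ===== LEMMAS AND PROOFS =====

-- a loop 'for t in l: if p t: label = c' is 'if any p then c else the initial label'
theorem pv_foldl_set (l : List String) (p : String → Bool) (c lab : Int) :
    l.foldl (fun lab t => if p t then c else lab) lab = if l.any p then c else lab := by
  induction l generalizing lab with
  | nil => simp
  | cons a l ih =>
    simp only [List.foldl_cons, List.any_cons, ih]
    by_cases h : p a = true <;> simp [h]

theorem pv_innerA_eq (cs : List Char) (t1 : String) (l2 : List String) (lab : Int) :
    pvInnerA cs t1 l2 lab =
      if PySem.Chars.isIn t1.toList cs && l2.any (fun t => PySem.Chars.isIn t.toList cs) then 1 else lab := by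
  induction l2 with
  | nil => simp [pvInnerA]
  | cons a l ih =>
    simp only [pvInnerA, ih, List.any_cons]
    by_cases h1 : PySem.Chars.isIn t1.toList cs = true <;>
      by_cases h2 : PySem.Chars.isIn a.toList cs = true <;> simp [h1, h2]

-- ===== VERDICT (by name: the statement is the Claim_ definition above) =====
theorem label_for_keyterm_and_sentence_spec : Claim_equal_label_for_keyterm_and_sentence := by
  intro keyterm sentence termdict _ hpre
  unfold Spec_label_for_keyterm_and_sentence
  unfold Pre_label_for_keyterm_and_sentence pvPreB at hpre
  unfold label_for_keyterm_and_sentence label_for_keyterm_and_sentence_alt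
  set cs : List Char := ' ' :: sentence.toList ++ [' '] with hcs
  cases hk : (PySem.Dict.mk termdict).get? keyterm with
  | none => simp [hk] at hpre
  | some entry =>
    simp only [hk] at hpre ⊢
    cases ha : (PySem.Dict.mk entry).get? "Any" with
    | none => simp [ha] at hpre
    | some anyl =>
      simp only [ha] at hpre ⊢
      rw [pv_foldl_set]
      by_cases hAny : anyl.any (fun t => PySem.Chars.isIn t.toList cs) = true
      · -- label already 1; only the Exclude pass matters
        simp only [hAny, if_true]
        cases hex : (PySem.Dict.mk entry).get? "Exclude" with
        | none => simp [PySem.Dict.getD_eq_get?_getD, hex]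
        | some lex => simp [PySem.Dict.getD_eq_get?_getD, hex, pv_foldl_set]
      · rw [Bool.not_eq_true] at hAny
        simp only [hAny, Bool.false_eq_true, if_false, Bool.false_or, if_true] at hpre ⊢
        have hlabel :
            (match (PySem.Dict.mk entry).get? "Term1" with
             | none => (0 : Int)
             | some l1 =>
               l1.foldl (fun lab t1 =>
                 match (PySem.Dict.mk entry).get? "Term2" with
                 | none => lab
                 | some l2 => pvInnerA cs t1 l2 lab) 0) =
            (match (PySem.Dict.mk entry).get? "Term1" with
             | some l1 =>
               if !l1.isEmpty then
                 if l1.any (fun t => PySem.Chars.isIn t.toList cs) then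
                   match (PySem.Dict.mk entry).get? "Term2" with
                   | none => 0
                   | some l2 => if l2.any (fun t => PySem.Chars.isIn t.toList cs) then 1 else 0
                 else 0
               else 0
             | none => (0 : Int)) := by
          cases h1 : (PySem.Dict.mk entry).get? "Term1" with
          | none => rfl
          | some l1 =>
            simp only [PySem.Dict.getD_eq_get?_getD, h1, Option.getD_some] at hpre
            by_cases he : l1.isEmpty
            · have : l1 = [] := by simpa using he
              simp [this]
            · simp only [he, Bool.not_false, if_true] at hpre ⊢
              cases h2 : (PySem.Dict.mk entry).get? "Term2" with
              | none => simp [h2] at hpre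
              | some l2 =>
                have : l1.foldl (fun lab t1 => pvInnerA cs t1 l2 lab) (0 : Int) =
                    if l1.any (fun t1 => PySem.Chars.isIn t1.toList cs &&
                        l2.any (fun t => PySem.Chars.isIn t.toList cs)) then 1 else 0 := by
                  rw [← pv_foldl_set l1 _ 1 0]
                  exact PySem.List.foldl_congr_mem l1 _ _ 0
                    (fun lab t1 _ => pv_innerA_eq cs t1 l2 lab)
                rw [this]
                by_cases hq : l2.any (fun t => PySem.Chars.isIn t.toList cs) = true <;>
                  simp [hq, List.any_eq_true]
        rw [hlabel]
        cases hex : (PySem.Dict.mk entry).get? "Exclude" with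
        | none => simp [PySem.Dict.getD_eq_get?_getD, hex]
        | some lex => simp [PySem.Dict.getD_eq_get?_getD, hex, pv_foldl_set]
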